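-- pv_equiv track=rewrite | github.com/jianglin7/PLC_transition_sequence_partition_old | extest/exdata.py | find_same_start_end_no_repeated_middle_subsequences
-- ===== SOURCE A (Python) =====
-- def find_same_start_end_no_repeated_middle_subsequences(sequence):
--     subsequences = []
--     n = len(sequence)
--     for start in range(n):
--         for end in range(start + 1, n):
--             if sequence[start] == sequence[end]:
--                 subsequence = sequence[start:end + 1]
--                 if subsequence not in subsequences:
--                     subsequences.append(subsequence)
--                 break
--     return subsequences
-- ===== SOURCE B (Python) =====
-- def find_same_start_end_no_repeated_middle_subsequences(sequence):
--     n = len(sequence)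
--     nxt = [None] * n
--     last = {}
--     for i in range(n - 1, -1, -1):
--         v = sequence[i]
--         nxt[i] = last.get(v)
--         last[v] = i
--     result = []
--     seen = set()
--     for i in range(n):
--         j = nxt[i]
--         if j is not None:
--             t = tuple(sequence[i:j + 1])
--             if t not in seen:
--                 seen.add(t)
--                 result.append(list(t))
--     return result
-- ===== Notes on version B (the rewrite author's own statement) =====
-- stated objective: faster
-- what changed: Replaces A's per-start forward re-scan for the next equal value and its list-of-lists membership dedup by a single right-to-left pass building a next-same-value dictionary, followed by one forward pass that slices and dedups with a set of tuples in first-seen order.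
import Mathlib
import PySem

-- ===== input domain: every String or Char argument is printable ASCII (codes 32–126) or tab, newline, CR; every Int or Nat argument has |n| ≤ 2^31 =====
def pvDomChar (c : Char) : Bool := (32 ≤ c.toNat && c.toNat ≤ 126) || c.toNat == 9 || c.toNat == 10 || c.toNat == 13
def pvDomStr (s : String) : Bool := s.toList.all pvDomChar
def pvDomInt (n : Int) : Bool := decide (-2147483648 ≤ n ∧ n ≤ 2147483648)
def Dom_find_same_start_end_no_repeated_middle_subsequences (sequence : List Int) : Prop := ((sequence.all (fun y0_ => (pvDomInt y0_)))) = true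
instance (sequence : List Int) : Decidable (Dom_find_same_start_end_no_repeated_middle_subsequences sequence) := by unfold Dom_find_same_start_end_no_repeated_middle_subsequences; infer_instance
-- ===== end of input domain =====

-- B replaces A's per-start forward re-scan and list-membership dedup by one right-to-left
-- next-same-value dictionary pass plus a seen-set dedup (objective: faster).

-- ===== PORT A =====
-- inner 'for end in range(start+1, n)' loop with its break
def pvInnerA (sequence : List Int) (start : Int) (subs : List (List Int)) :
    List Int → List (List Int)
  | [] => subs
  | e :: rest =>
    if PySem.List.pyGetD sequence start 0 == PySem.List.pyGetD sequence e 0 then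
      let sub := PySem.List.slice sequence (some start) (some (e + 1))
      if sub ∈ subs then subs else subs ++ [sub]
    else pvInnerA sequence start subs rest

def find_same_start_end_no_repeated_middle_subsequences (sequence : List Int) : List (List Int) :=
  let n : Int := sequence.length
  (PySem.List.pyRange 0 n 1).foldl
    (fun subs start => pvInnerA sequence start subs (PySem.List.pyRange (start + 1) n 1)) []

-- ===== PORT B =====
-- right-to-left pass: nxt[i] = last.get(sequence[i]) before last[sequence[i]] = i
def pvBuildNext : List Int → Nat → PySem.Dict Int Nat × List (Option Nat)
  | [], _ => (PySem.Dict.empty, [])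
  | v :: rest, i =>
    let p := pvBuildNext rest (i + 1)
    (p.1.insert v i, p.1.get? v :: p.2)

-- forward pass over nxt with the seen set
def pvCollectB (sequence : List Int) :
    List (Option Nat) → Nat → PySem.Set (List Int) → List (List Int) → List (List Int)
  | [], _, _, result => result
  | none :: rest, i, seen, result => pvCollectB sequence rest (i + 1) seen result
  | some j :: rest, i, seen, result =>
    let t := PySem.List.slice sequence (some (i : Int)) (some ((j : Int) + 1))
    if PySem.Set.contains seen t then pvCollectB sequence rest (i + 1) seen result
    else pvCollectB sequence rest (i + 1) (PySem.Set.add seen t) (result ++ [t])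

def find_same_start_end_no_repeated_middle_subsequences_alt (sequence : List Int) : List (List Int) :=
  pvCollectB sequence (pvBuildNext sequence 0).2 0 PySem.Set.empty []

-- ===== PRECONDITION & SPEC =====
def Spec_find_same_start_end_no_repeated_middle_subsequences (sequence : List Int) (out : List (List Int)) : Prop := out = find_same_start_end_no_repeated_middle_subsequences_alt sequence
instance (sequence : List Int) (out : List (List Int)) : Decidable (Spec_find_same_start_end_no_repeated_middle_subsequences sequence out) := by unfold Spec_find_same_start_end_no_repeated_middle_subsequences; infer_instance

-- ===== CLAIM (what is proved, stated in full; the proofs are below) =====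
def Claim_equal_find_same_start_end_no_repeated_middle_subsequences : Prop := ∀ (sequence : List Int), Dom_find_same_start_end_no_repeated_middle_subsequences sequence → Spec_find_same_start_end_no_repeated_middle_subsequences sequence (find_same_start_end_no_repeated_middle_subsequences sequence)

-- ===== LEMMAS AND PROOFS =====

-- the dictionary built by the right-to-left pass maps v to the first index of v (offset by i)
lemma pvBuildNext_get? (l : List Int) : ∀ (i : Nat) (v : Int),
    ((pvBuildNext l i).1).get? v = (l.findIdx? (· == v)).map (· + i) := by
  induction l with
  | nil => intro i v; rfl
  | cons x rest ih =>
    intro i v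
    by_cases hv : x = v
    · subst hv
      simp [pvBuildNext, PySem.Dict.get?_insert_self, List.findIdx?_cons]
    · have hne : (x == v) = false := by simp [hv]
      simp only [pvBuildNext, List.findIdx?_cons, hne, Bool.false_eq_true, if_false]
      rw [PySem.Dict.get?_insert_of_ne _ _ (Ne.symm hv), ih]
      cases rest.findIdx? (· == v) with
      | none => simp
      | some m => simp; omega

-- A's inner scan from position i+1+k returns the first matching end, as findIdx? on the suffix
lemma pvInnerA_eq (sequence : List Int) (i : Nat) :
    ∀ (fuel k : Nat) (subs : List (List Int)),
      sequence.length ≤ i + 1 + k + fuel →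
      pvInnerA sequence (i : Int) subs
          (PySem.List.pyRange ((i : Int) + 1 + (k : Int)) (sequence.length : Int) 1)
        = match ((sequence.drop (i + 1 + k)).findIdx?
              (· == PySem.List.pyGetD sequence (i : Int) 0)).map (· + (i + 1 + k)) with
          | none => subs
          | some j =>
            let t := PySem.List.slice sequence (some (i : Int)) (some ((j : Int) + 1))
            if t ∈ subs then subs else subs ++ [t]
  | fuel, k, subs, hle => by
    by_cases hk : sequence.length ≤ i + 1 + k
    · rw [PySem.List.pyRange_one_eq_nil (by exact_mod_cast hk),
        List.drop_eq_nil_of_le hk]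
      simp [pvInnerA]
    · push_neg at hk
      have hcons : PySem.List.pyRange ((i : Int) + 1 + (k : Int)) (sequence.length : Int) 1
          = ((i : Int) + 1 + (k : Int)) :: PySem.List.pyRange ((i : Int) + 1 + (k : Int) + 1) (sequence.length : Int) 1 :=
        PySem.List.pyRange_one_cons (by exact_mod_cast hk)
      have hdrop : sequence.drop (i + 1 + k) = sequence[i + 1 + k] :: sequence.drop (i + 1 + k + 1) :=
        List.drop_eq_getElem_cons hk
      have hget : PySem.List.pyGetD sequence ((i : Int) + 1 + (k : Int)) 0 = sequence[i + 1 + k] := by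
        have : ((i : Int) + 1 + (k : Int)) = ((i + 1 + k : Nat) : Int) := by push_cast; ring
        rw [this, PySem.List.pyGetD_natCast, List.getD_eq_getElem _ _ hk]
      rw [hcons]
      show (if PySem.List.pyGetD sequence (i : Int) 0 == PySem.List.pyGetD sequence ((i:Int)+1+(k:Int)) 0 then _ else _) = _
      rw [hget, hdrop]
      by_cases heq : (sequence[i + 1 + k] == PySem.List.pyGetD sequence (i : Int) 0) = true
      · have heq' : (PySem.List.pyGetD sequence (i:Int) 0 == sequence[i + 1 + k]) = true := by
          simp at heq ⊢; omega
        rw [if_pos heq']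
        simp only [List.findIdx?_cons, heq, if_true, Option.map_some]
        have : ((i : Int) + 1 + (k : Int) + 1) = (((0 + (i + 1 + k) : Nat) : Int) + 1) := by
          push_cast; ring
        simp only [this]
      · rw [Bool.not_eq_true] at heq
        have heq' : (PySem.List.pyGetD sequence (i:Int) 0 == sequence[i + 1 + k]) = false := by
          simp at heq ⊢; exact fun h => heq h.symm
        rw [if_neg (by simp at heq' ⊢; exact heq')]
        have fuel0 : fuel ≠ 0 := by rintro rfl; omega
        obtain ⟨fuel', rfl⟩ : ∃ f, fuel = f + 1 := ⟨fuel - 1, by omega⟩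
        have hrec := pvInnerA_eq sequence i fuel' (k + 1) subs (by omega)
        have harg : ((i : Int) + 1 + ((k : Nat) + 1 : Nat)) = ((i : Int) + 1 + (k : Int) + 1) := by
          push_cast; ring
        rw [harg] at hrec
        rw [hrec]
        simp only [List.findIdx?_cons, heq, Bool.false_eq_true, if_false]
        have hidx : i + 1 + (k + 1) = i + 1 + k + 1 := by omega
        rw [hidx]
        cases (sequence.drop (i + 1 + k + 1)).findIdx? (· == PySem.List.pyGetD sequence (i : Int) 0) with
        | none => simp
        | some m =>
          simp only [Option.map_some]
          have : m + 1 + (i + 1 + k) = m + (i + 1 + k + 1) := by omega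
          rw [this]

-- the two main loops agree, given the seen-set ↔ result-list membership invariant
lemma pvGrand (sequence : List Int) :
    ∀ (fuel i : Nat) (seen : PySem.Set (List Int)) (subs : List (List Int)),
      sequence.length ≤ i + fuel →
      (∀ t, t ∈ seen ↔ t ∈ subs) →
      (PySem.List.pyRange (i : Int) (sequence.length : Int) 1).foldl
          (fun subs start => pvInnerA sequence start subs
            (PySem.List.pyRange (start + 1) (sequence.length : Int) 1)) subs
        = pvCollectB sequence (pvBuildNext (sequence.drop i) i).2 i seen subs := by
  intro fuel
  induction fuel with
  | zero =>
    intro i seen subs hle hinv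
    rw [PySem.List.pyRange_one_eq_nil (by exact_mod_cast hle),
      List.drop_eq_nil_of_le (by omega)]
    simp [pvBuildNext, pvCollectB]
  | succ fuel ih =>
    intro i seen subs hle hinv
    by_cases hi : sequence.length ≤ i
    · rw [PySem.List.pyRange_one_eq_nil (by exact_mod_cast hi),
        List.drop_eq_nil_of_le hi]
      simp [pvBuildNext, pvCollectB]
    · push_neg at hi
      have hdrop : sequence.drop i = sequence[i] :: sequence.drop (i + 1) :=
        List.drop_eq_getElem_cons hi
      rw [PySem.List.pyRange_one_cons (by exact_mod_cast hi), List.foldl_cons, hdrop]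
      have hinner := pvInnerA_eq sequence i (sequence.length) 0 subs (by omega)
      have harg : ((i : Int) + 1 + ((0 : Nat) : Int)) = ((i : Int) + 1) := by push_cast; ring
      rw [harg] at hinner
      rw [hinner]
      have hgeti : PySem.List.pyGetD sequence (i : Int) 0 = sequence[i] := by
        rw [PySem.List.pyGetD_natCast, List.getD_eq_getElem _ _ hi]
      simp only [pvBuildNext, pvCollectB, pvBuildNext_get?, hgeti, Nat.add_zero]
      cases hfind : (sequence.drop (i + 1)).findIdx? (· == sequence[i]) with
      | none =>
        simp only [Option.map_none]
        exact ih (i + 1) seen subs (by omega) hinv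
      | some m =>
        simp only [Option.map_some, pvCollectB]
        set t := PySem.List.slice sequence (some (i : Int)) (some (((m + (i + 1) : Nat) : Int) + 1)) with ht
        by_cases hmem : t ∈ subs
        · rw [if_pos hmem, if_pos (by simp; exact (hinv t).2 hmem)]
          exact ih (i + 1) seen subs (by omega) hinv
        · rw [if_neg hmem, if_neg (by simp; exact fun h => hmem ((hinv t).1 h))]
          refine ih (i + 1) (PySem.Set.add seen t) (subs ++ [t]) (by omega) ?_
          intro u
          rw [PySem.Set.mem_add, List.mem_append, List.mem_singleton, hinv u]

-- ===== VERDICT (by name: the statement is the Claim_ definition above) =====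
theorem find_same_start_end_no_repeated_middle_subsequences_spec : Claim_equal_find_same_start_end_no_repeated_middle_subsequences := by
  intro sequence _
  show _ = _
  unfold find_same_start_end_no_repeated_middle_subsequences
    find_same_start_end_no_repeated_middle_subsequences_alt
  have := pvGrand sequence sequence.length 0 PySem.Set.empty []
    (by omega) (by intro t; simp [PySem.Set.empty])
  simpa using this
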